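-- pv_equiv track=rewrite | github.com/wyf-python/word2vec-text-rnn | number/preprocess.py | detokenize_percent
-- ===== SOURCE A (Python) =====
-- def detokenize_percent(text):
--     chars = list(text)
--     for index, char in enumerate(chars):
--         if (index + 2 < len(chars)) and char.isdigit() and chars[index + 1] is ' ' and chars[index + 2] is '%':
--             chars[index] = char + chars[index + 2]
--             del chars[index + 1]
--             del chars[index + 1]
--
--     return ''.join(chars)
-- ===== SOURCE B (Python) =====
-- def detokenize_percent(text):
--     out = []
--     i = 0
--     n = len(text)
--     while i < n:
--         if i + 2 < n and text[i].isdigit() and text[i + 1] == ' ' and text[i + 2] == '%':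
--             out.append(text[i] + '%')
--             i += 3
--         else:
--             out.append(text[i])
--             i += 1
--     return ''.join(out)
-- ===== Notes on version B (the rewrite author's own statement) =====
-- stated objective: simpler
-- what changed: B replaces A's in-place char-list mutation (overwriting a cell and deleting two cells while enumerate walks the shrinking list) with a single forward index scan over the immutable string that builds a fresh output list, consuming three characters on a match and one otherwise.
import Mathlib
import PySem

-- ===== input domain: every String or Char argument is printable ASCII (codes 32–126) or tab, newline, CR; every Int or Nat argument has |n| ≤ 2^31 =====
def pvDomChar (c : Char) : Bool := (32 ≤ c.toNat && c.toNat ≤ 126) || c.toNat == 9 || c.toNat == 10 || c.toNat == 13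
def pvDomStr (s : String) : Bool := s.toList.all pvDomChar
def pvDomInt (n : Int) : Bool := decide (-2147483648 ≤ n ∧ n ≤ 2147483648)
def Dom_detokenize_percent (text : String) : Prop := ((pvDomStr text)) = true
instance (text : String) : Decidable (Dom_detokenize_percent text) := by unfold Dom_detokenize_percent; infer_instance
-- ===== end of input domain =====

-- B rebuilds the output in one forward scan instead of A's in-place cell overwrite + deletions; return values proved equal.

-- ===== PORT A =====
-- A's `chars` is a Python list of strings (single chars, plus two-char merged cells),
-- modelled as List (List Char). The enumerate-over-a-mutating-list loop becomes index
-- recursion over the current list state; Python's `is ' '`/`is '%'` compare interned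
-- 1-char strings, i.e. equality of the cells, ported as `==`.
def pvA_loop (chars : List (List Char)) (i : Nat) : List (List Char) :=
  if i < chars.length then
    let char := chars.getD i []
    if (decide (i + 2 < chars.length) && PySem.Chars.strIsdigit char
        && (chars.getD (i+1) [] == [' ']) && (chars.getD (i+2) [] == ['%'])) then
      pvA_loop (((chars.set i (char ++ chars.getD (i+2) [])).eraseIdx (i+1)).eraseIdx (i+1)) (i+1)
    else
      pvA_loop chars (i+1)
  else chars
termination_by chars.length - i
decreasing_by
  · rename_i hlt h
    simp only [Bool.and_eq_true, decide_eq_true_eq] at h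
    simp only [List.length_eraseIdx, List.length_set]
    split_ifs <;> omega
  · omega

def detokenize_percent (text : String) : String :=
  String.ofList (pvA_loop (text.toList.map (fun c => [c])) 0).flatten

-- ===== PORT B =====
-- Source B: `while i < n` over the immutable text, appending 1- or 2-char pieces to `out`.
def pvB_loop (cs : List Char) (n : Nat) (i : Nat) (out : List (List Char)) : List (List Char) :=
  if i < n then
    if (decide (i + 2 < n) && PySem.Chars.isdigit (cs.getD i ' ')
        && (cs.getD (i+1) ' ' == ' ') && (cs.getD (i+2) ' ' == '%')) then
      pvB_loop cs n (i+3) (out ++ [[cs.getD i ' ', '%']])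
    else
      pvB_loop cs n (i+1) (out ++ [[cs.getD i ' ']])
  else out
termination_by n - i

def detokenize_percent_alt (text : String) : String :=
  String.ofList (pvB_loop text.toList text.toList.length 0 []).flatten

-- ===== PRECONDITION & SPEC =====
def Spec_detokenize_percent (text : String) (out : String) : Prop := out = detokenize_percent_alt text
instance (text : String) (out : String) : Decidable (Spec_detokenize_percent text out) := by unfold Spec_detokenize_percent; infer_instance

-- ===== CLAIM (what is proved, stated in full; the proofs are below) =====
def Claim_equal_detokenize_percent : Prop := ∀ (text : String), Dom_detokenize_percent text → Spec_detokenize_percent text (detokenize_percent text)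

-- ===== LEMMAS AND PROOFS =====

-- canonical single-pass description both loops are reduced to
def pvCanon : List Char → List (List Char)
  | c :: d :: e :: rest =>
    if PySem.Chars.isdigit c && (d == ' ') && (e == '%') then
      [c, '%'] :: pvCanon rest
    else
      [c] :: pvCanon (d :: e :: rest)
  | l => l.map (fun c => [c])

lemma pvCanon_short (l : List Char) (h : l.length ≤ 2) :
    pvCanon l = l.map (fun c => [c]) := by
  match l with
  | [] => rfl
  | [_] => rfl
  | [_, _] => rfl
  | _ :: _ :: _ :: _ => simp at h

lemma pvA_loop_eq (cs : List Char) (pre : List (List Char)) :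
    pvA_loop (pre ++ cs.map (fun c => [c])) pre.length = pre ++ pvCanon cs := by
  induction cs using pvCanon.induct generalizing pre with
  | case1 c d e rest hcond ih =>
    obtain ⟨⟨hc, hd⟩, he⟩ : (PySem.Chars.isdigit c = true ∧ d = ' ') ∧ e = '%' := by
      simpa using hcond
    subst hd; subst he
    have hget0 : (pre ++ (c :: ' ' :: '%' :: rest).map (fun c => [c])).getD pre.length [] = [c] := by
      simp [List.getD]
    have hget1 : (pre ++ (c :: ' ' :: '%' :: rest).map (fun c => [c])).getD (pre.length + 1) [] = [' '] := by
      simp [List.getD]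
    have hget2 : (pre ++ (c :: ' ' :: '%' :: rest).map (fun c => [c])).getD (pre.length + 2) [] = ['%'] := by
      simp [List.getD]
    rw [pvA_loop]
    have hlen : pre.length < (pre ++ (c :: ' ' :: '%' :: rest).map (fun c => [c])).length := by simp
    simp only [hlen, if_true, hget0, hget1, hget2]
    have hstate :
        (((pre ++ (c :: ' ' :: '%' :: rest).map (fun c => [c])).set pre.length ([c] ++ ['%'])).eraseIdx
            (pre.length + 1)).eraseIdx (pre.length + 1)
          = (pre ++ [[c, '%']]) ++ rest.map (fun c => [c]) := by
      rw [List.set_append_right _ _ (Nat.le_refl _)]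
      simp only [Nat.sub_self, List.map_cons, List.set_cons_zero]
      rw [show pre ++ (([c] ++ ['%']) :: [' '] :: ['%'] :: rest.map (fun c => [c]))
            = (pre ++ [[c, '%']]) ++ ([' '] :: ['%'] :: rest.map (fun c => [c])) from by simp]
      rw [List.eraseIdx_append_of_length_le (by simp)]
      rw [List.eraseIdx_append_of_length_le (by simp)]
      simp
    split
    · rw [hstate]
      have hpre : pre.length + 1 = (pre ++ [[c, '%']]).length := by simp
      rw [hpre, ih (pre ++ [[c, '%']])]
      have hcanon : pvCanon (c :: ' ' :: '%' :: rest) = [c, '%'] :: pvCanon rest := by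
        rw [pvCanon]; simp [hc]
      rw [hcanon]
      simp
    · next hfalse =>
      exfalso
      apply hfalse
      simp [PySem.Chars.strIsdigit, hc]
  | case2 c d e rest hcond ih =>
    have hcondf : (PySem.Chars.isdigit c && (d == ' ') && (e == '%')) = false := by
      revert hcond
      cases h : (PySem.Chars.isdigit c && (d == ' ') && (e == '%')) <;> simp
    have hget0 : (pre ++ (c :: d :: e :: rest).map (fun c => [c])).getD pre.length [] = [c] := by
      simp [List.getD]
    have hget1 : (pre ++ (c :: d :: e :: rest).map (fun c => [c])).getD (pre.length + 1) [] = [d] := by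
      simp [List.getD]
    have hget2 : (pre ++ (c :: d :: e :: rest).map (fun c => [c])).getD (pre.length + 2) [] = [e] := by
      simp [List.getD]
    rw [pvA_loop]
    have hlen : pre.length < (pre ++ (c :: d :: e :: rest).map (fun c => [c])).length := by simp
    simp only [hlen, if_true, hget0, hget1, hget2]
    split
    · next htrue =>
      exfalso
      simp only [Bool.and_eq_true, decide_eq_true_eq, beq_iff_eq, List.cons.injEq, and_true,
        PySem.Chars.strIsdigit] at htrue
      simp only [Bool.and_eq_false_iff] at hcondf
      rcases hcondf with (h | h) | h <;> simp_all
    · have hpre : pre.length + 1 = (pre ++ [[c]]).length := by simp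
      have hlist : pre ++ (c :: d :: e :: rest).map (fun c => [c])
          = (pre ++ [[c]]) ++ (d :: e :: rest).map (fun c => [c]) := by
        simp
      rw [hlist, hpre, ih (pre ++ [[c]])]
      have hcanon : pvCanon (c :: d :: e :: rest) = [c] :: pvCanon (d :: e :: rest) := by
        rw [pvCanon]; simp [hcondf]
      rw [hcanon]
      simp
  | case3 l hshape =>
    have hcanon : pvCanon l = l.map (fun c => [c]) := by
      apply pvCanon_short
      rcases l with _ | ⟨a, _ | ⟨b, _ | ⟨c, r⟩⟩⟩
      · simp
      · simp
      · simp
      · exact (hshape a b c r rfl).elim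
    rw [hcanon]
    rcases l with _ | ⟨a, _ | ⟨b, r⟩⟩
    · rw [pvA_loop]; simp
    · rw [pvA_loop]
      have h1 : pre.length < (pre ++ [a].map (fun c => [c])).length := by simp
      simp only [h1, if_true]
      have hc : (decide (pre.length + 2 < (pre ++ [a].map (fun c => [c])).length)) = false := by
        simp
      rw [hc]
      simp only [Bool.false_and, if_false, Bool.false_eq_true]
      rw [pvA_loop]
      simp
    · have hr : r = [] := by
        rcases r with _ | ⟨c, r'⟩
        · rfl
        · exact (hshape a b c r' rfl).elim
      subst hr
      rw [pvA_loop]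
      have h1 : pre.length < (pre ++ [a, b].map (fun c => [c])).length := by simp
      simp only [h1, if_true]
      have hc1 : (decide (pre.length + 2 < (pre ++ [a, b].map (fun c => [c])).length)) = false := by
        simp
      rw [hc1]
      simp only [Bool.false_and, if_false, Bool.false_eq_true]
      rw [pvA_loop]
      have h2 : pre.length + 1 < (pre ++ [a, b].map (fun c => [c])).length := by simp
      simp only [h2, if_true]
      have hc2 : (decide (pre.length + 1 + 2 < (pre ++ [a, b].map (fun c => [c])).length)) = false := by
        simp
      rw [hc2]
      simp only [Bool.false_and, if_false, Bool.false_eq_true]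
      rw [pvA_loop]
      simp

lemma pvB_loop_eq (cs : List Char) (k i : Nat) (out : List (List Char))
    (hk : cs.length - i ≤ k) (h : i ≤ cs.length) :
    pvB_loop cs cs.length i out = out ++ pvCanon (cs.drop i) := by
  induction k generalizing i out with
  | zero =>
    have hi : i = cs.length := by omega
    subst hi
    rw [pvB_loop]
    simp [pvCanon]
  | succ k ih =>
    rw [pvB_loop]
    by_cases hi : i < cs.length
    · simp only [hi, if_true]
      have hg0 : cs.getD i ' ' = cs[i] := List.getD_eq_getElem cs ' ' hi
      have hdi : cs.drop i = cs[i] :: cs.drop (i+1) := List.drop_eq_getElem_cons hi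
      by_cases h2 : i + 2 < cs.length
      · have hg1 : cs.getD (i+1) ' ' = cs[i+1] := List.getD_eq_getElem cs ' ' (by omega)
        have hg2 : cs.getD (i+2) ' ' = cs[i+2] := List.getD_eq_getElem cs ' ' h2
        have hd1 : cs.drop (i+1) = cs[i+1] :: cs.drop (i+2) := List.drop_eq_getElem_cons (by omega)
        have hd2 : cs.drop (i+2) = cs[i+2] :: cs.drop (i+3) := List.drop_eq_getElem_cons h2
        have hdrop3 : cs.drop i = cs[i] :: cs[i+1] :: cs[i+2] :: cs.drop (i+3) := by
          rw [hdi, hd1, hd2]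
        simp only [hg0, hg1, hg2, h2, decide_true, Bool.true_and]
        by_cases hm : (PySem.Chars.isdigit cs[i] && (cs[i+1] == ' ') && (cs[i+2] == '%')) = true
        · rw [if_pos hm]
          rw [ih (i+3) _ (by omega) (by omega)]
          rw [hdrop3, pvCanon]
          rw [if_pos hm]
          simp
        · rw [if_neg hm]
          rw [ih (i+1) _ (by omega) (by omega)]
          rw [hdrop3, pvCanon]
          rw [if_neg hm, ← hd2, ← hd1]
          simp
      · have hcnd : (decide (i + 2 < cs.length) && PySem.Chars.isdigit (cs.getD i ' ')
            && (cs.getD (i+1) ' ' == ' ') && (cs.getD (i+2) ' ' == '%')) = false := by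
          simp [h2]
        rw [hcnd]
        simp only [if_false, Bool.false_eq_true]
        rw [ih (i+1) _ (by omega) (by omega)]
        have hs1 : pvCanon (cs.drop i) = (cs.drop i).map (fun c => [c]) :=
          pvCanon_short _ (by simp; omega)
        have hs2 : pvCanon (cs.drop (i+1)) = (cs.drop (i+1)).map (fun c => [c]) :=
          pvCanon_short _ (by simp; omega)
        rw [hs1, hs2, hdi, hg0]
        simp only [List.map_cons]
        simp
    · have hi' : i = cs.length := by omega
      subst hi'
      simp [pvCanon]

-- ===== VERDICT (by name: the statement is the Claim_ definition above) =====
theorem detokenize_percent_spec : Claim_equal_detokenize_percent := by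
  intro text _
  unfold Spec_detokenize_percent detokenize_percent detokenize_percent_alt
  rw [pvB_loop_eq text.toList text.toList.length 0 [] (by omega) (by omega)]
  have h := pvA_loop_eq text.toList []
  simp only [List.nil_append, List.length_nil] at h
  rw [h]
  simp
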